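-- pv_equiv track=rewrite | github.com/timptner/advent-of-code-legacy | year2023/day19.py | make_rules_independent
-- ===== SOURCE A (Python) =====
-- def make_rules_independent(workflows: dict) -> dict:
--     improved_workflows = {}
--     for name, rules in workflows.items():
--         next_names, conditions = zip(*rules)
--         new_rules = []
--         for index, next_name in enumerate(next_names):
--             new_conditions = []
--             condition = conditions[index]
--             if condition:
--                 new_conditions.append(condition)
--             for condition in conditions[:index]:
--                 if '>' in condition:
--                     condition = condition.replace('>', '<=')
--                 else:
--                     condition = condition.replace('<', '>=')
--                 new_conditions.append(condition)
--             rule = next_name, new_conditions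
--             new_rules.append(rule)
--         improved_workflows[name] = new_rules
--     return improved_workflows
-- ===== SOURCE B (Python) =====
-- def make_rules_independent(workflows: dict) -> dict:
--     improved_workflows = {}
--     for name, rules in workflows.items():
--         next_names, conditions = zip(*rules)  # preserves ValueError on empty rules
--         negated = []
--         new_rules = []
--         for next_name, condition in zip(next_names, conditions):
--             new_conditions = ([condition] if condition else []) + negated
--             new_rules.append((next_name, new_conditions))
--             negated = negated + [condition.replace('>', '<=') if '>' in condition
--                                  else condition.replace('<', '>=')]
--         improved_workflows[name] = new_rules
--     return improved_workflows
-- ===== Notes on version B (the rewrite author's own statement) =====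
-- stated objective: faster
-- what changed: B carries the negated prior conditions in an accumulator extended once per rule, instead of re-slicing conditions[:index] and re-negating every prior condition for every rule as A does.
import Mathlib
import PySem

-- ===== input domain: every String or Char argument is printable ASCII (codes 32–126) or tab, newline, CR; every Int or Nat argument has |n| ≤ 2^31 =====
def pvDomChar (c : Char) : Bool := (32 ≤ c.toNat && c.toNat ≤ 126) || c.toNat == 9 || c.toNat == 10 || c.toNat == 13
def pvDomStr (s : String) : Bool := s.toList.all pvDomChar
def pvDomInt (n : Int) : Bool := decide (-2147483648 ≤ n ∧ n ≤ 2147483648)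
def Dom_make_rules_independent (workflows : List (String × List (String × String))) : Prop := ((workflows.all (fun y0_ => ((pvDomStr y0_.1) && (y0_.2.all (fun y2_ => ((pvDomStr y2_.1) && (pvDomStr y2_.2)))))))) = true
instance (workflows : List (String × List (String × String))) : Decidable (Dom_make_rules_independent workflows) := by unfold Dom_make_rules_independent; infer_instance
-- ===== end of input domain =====

-- B replaces A's per-rule re-slicing and re-negation of conditions[:index] by an accumulator
-- of already-negated conditions extended once per rule (each condition negated once, not once
-- per later rule). Equivalence of return values proved on all inputs whose rules lists are
-- nonempty (on an empty rules list both Pythons raise ValueError at zip(*rules)).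

-- ===== PORT A =====
-- negation of one condition: condition.replace('>','<=') if '>' in condition else condition.replace('<','>=')
def pvNeg (c : String) : String :=
  if PySem.Str.isIn ">" c then PySem.Str.replace c ">" "<=" else PySem.Str.replace c "<" ">="

-- dict build: workflow names are the keys of the input dict, hence distinct, so
-- improved_workflows[name] = new_rules appends a fresh entry in insertion order.
def make_rules_independent (workflows : List (String × List (String × String))) : List (String × List (String × List String)) :=
  workflows.foldl (fun improved wf =>
    let next_names := wf.2.map (·.1)
    let conditions := wf.2.map (·.2)
    let new_rules := (PySem.List.enumerate next_names 0).foldl (fun nrs p =>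
      let condition := PySem.List.pyGetD conditions p.1 ""   -- conditions[index], index always in range
      let new_conditions := if condition ≠ "" then [condition] else []   -- 'if condition:' truthiness
      let new_conditions := (PySem.List.slice conditions none (some p.1)).foldl
        (fun ncs c => ncs ++ [pvNeg c]) new_conditions
      nrs ++ [(p.2, new_conditions)]) []
    improved ++ [(wf.1, new_rules)]) []

-- ===== PORT B =====
-- one step of B's single pass: state = (negated prefix, rules emitted so far)
def pvBStep (st : List String × List (String × List String)) (r : String × String) : List String × List (String × List String) :=
  (st.1 ++ [pvNeg r.2], st.2 ++ [(r.1, (if r.2 ≠ "" then [r.2] else []) ++ st.1)])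

def make_rules_independent_alt (workflows : List (String × List (String × String))) : List (String × List (String × List String)) :=
  workflows.map (fun wf => (wf.1, (wf.2.foldl pvBStep ([], [])).2))

-- ===== PRECONDITION & SPEC =====
-- Pre_ excludes workflows containing an empty rules list: there both Pythons raise ValueError
-- ("not enough values to unpack") at 'next_names, conditions = zip(*rules)'.
def Pre_make_rules_independent (workflows : List (String × List (String × String))) : Prop :=
  ∀ wf ∈ workflows, wf.2 ≠ []
instance (workflows : List (String × List (String × String))) : Decidable (Pre_make_rules_independent workflows) := by unfold Pre_make_rules_independent; infer_instance

def pvWitness_make_rules_independent : (List (String × List (String × String))) :=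
  [("in", [("qqz", "s>2770"), ("A", "m<1801"), ("rfg", "")])]

def Spec_make_rules_independent (workflows : List (String × List (String × String))) (out : List (String × List (String × List String))) : Prop := out = make_rules_independent_alt workflows
instance (workflows : List (String × List (String × String))) (out : List (String × List (String × List String))) : Decidable (Spec_make_rules_independent workflows out) := by unfold Spec_make_rules_independent; infer_instance

-- ===== CLAIM (what is proved, stated in full; the proofs are below) =====
def Claim_equal_make_rules_independent : Prop := ∀ (workflows : List (String × List (String × String))), Dom_make_rules_independent workflows → Pre_make_rules_independent workflows → Spec_make_rules_independent workflows (make_rules_independent workflows)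

-- ===== LEMMAS AND PROOFS =====

-- common shape of one workflow's rewritten rules: carry the negated prefix
def pvSpecGo (negs : List String) : List (String × String) → List (String × List String)
  | [] => []
  | r :: rest => (r.1, (if r.2 ≠ "" then [r.2] else []) ++ negs) :: pvSpecGo (negs ++ [pvNeg r.2]) rest

theorem pvB_go (rules : List (String × String)) :
    ∀ (negs : List String) (acc : List (String × List String)),
      (rules.foldl pvBStep (negs, acc)).2 = acc ++ pvSpecGo negs rules := by
  induction rules with
  | nil => intro negs acc; simp [pvSpecGo]
  | cons r rest ih =>
      intro negs acc
      simp [pvBStep, pvSpecGo, ih]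

theorem pvGetD_append_cons {α : Type} (l₁ l₂ : List α) (a d : α) :
    (l₁ ++ a :: l₂).getD l₁.length d = a := by
  simp [List.getD]

theorem pvA_go (rest : List (String × String)) :
    ∀ (pre : List (String × String)),
      (PySem.List.enumerate (rest.map (·.1)) (pre.length : Int)).map (fun p =>
        (p.2,
          (if PySem.List.pyGetD ((pre ++ rest).map (·.2)) p.1 "" ≠ "" then
              [PySem.List.pyGetD ((pre ++ rest).map (·.2)) p.1 ""] else []) ++
          (PySem.List.slice ((pre ++ rest).map (·.2)) none (some p.1)).map pvNeg))
      = pvSpecGo ((pre.map (·.2)).map pvNeg) rest := by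
  induction rest with
  | nil => intro pre; simp [pvSpecGo]
  | cons r rest ih =>
      intro pre
      rw [List.map_cons, PySem.List.enumerate_cons, List.map_cons]
      have hget : PySem.List.pyGetD ((pre ++ r :: rest).map (·.2)) (pre.length : Int) "" = r.2 := by
        rw [PySem.List.pyGetD_natCast]
        have : ((pre ++ r :: rest).map (·.2)) = pre.map (·.2) ++ r.2 :: rest.map (·.2) := by simp
        rw [this]
        have hl : (pre.map (·.2) : List String).length = pre.length := by simp
        rw [← hl]
        exact pvGetD_append_cons _ _ _ _
      have hslice : PySem.List.slice ((pre ++ r :: rest).map (·.2)) none (some (pre.length : Int))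
          = pre.map (·.2) := by
        rw [PySem.List.slice_to_natCast]
        have : ((pre ++ r :: rest).map (·.2)) = pre.map (·.2) ++ r.2 :: rest.map (·.2) := by simp
        rw [this]
        exact List.take_left' (by simp)
      have hlen : ((pre.length : Int) + 1) = (((pre ++ [r]).length : Nat) : Int) := by
        simp
      have happ : pre ++ r :: rest = (pre ++ [r]) ++ rest := by simp
      rw [pvSpecGo, hget, hslice, hlen, happ, ih (pre ++ [r])]
      simp

-- per-workflow equality: A's enumerate/slice loop = B's accumulator pass
theorem pv_inner_eq (rules : List (String × String)) :
    (PySem.List.enumerate (rules.map (·.1)) 0).foldl (fun nrs p =>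
      let condition := PySem.List.pyGetD (rules.map (·.2)) p.1 ""
      let new_conditions := if condition ≠ "" then [condition] else []
      let new_conditions := (PySem.List.slice (rules.map (·.2)) none (some p.1)).foldl
        (fun ncs c => ncs ++ [pvNeg c]) new_conditions
      nrs ++ [(p.2, new_conditions)]) []
    = (rules.foldl pvBStep ([], [])).2 := by
  rw [pvB_go rules [] []]
  have h := pvA_go rules []
  simp only [List.nil_append, List.length_nil, Nat.cast_zero, List.map_nil] at h
  rw [← h, PySem.List.foldl_append_singleton_eq_map]
  simp only [List.nil_append]
  refine List.map_congr_left (fun p _ => ?_)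
  simp only [PySem.List.foldl_append_singleton_eq_map]

-- ===== VERDICT (by name: the statement is the Claim_ definition above) =====
theorem make_rules_independent_spec : Claim_equal_make_rules_independent := by
  intro workflows _ _
  unfold Spec_make_rules_independent make_rules_independent make_rules_independent_alt
  rw [PySem.List.foldl_append_singleton_eq_map]
  simp only [List.nil_append]
  refine List.map_congr_left (fun wf _ => ?_)
  exact congrArg (fun x => (wf.1, x)) (pv_inner_eq wf.2)
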